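-- pv_equiv track=rewrite | github.com/hahyuning/Coding-test-study | test/카카오/2020 recruitment/level 3/외벽 점검 (브루트포스).py | solution
-- ===== SOURCE A (Python) =====
-- from itertools import permutations
--
-- def solution(n, weak, dist):
--     m = len(weak)
--     # weak 일자로 늘리기
--     weak += [x + n for x in weak]
--
--     ans = -1
--     # weak 의 각 위치를 시작점으로
--     for s in range(m):
--         # 가능한 모든 친구 순서 확인
--         for order in list(permutations(dist)):
--             cnt = 0 # 현재 투입된 친구의 수
--             now = weak[s] + order[cnt] # 현재까지 검사를 완료한 지점
--
--             for i, x in enumerate(weak[s:s + m], start=s):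
--                 # 현재 인원만으로 검사를 할 수 없는 경우
--                 if now < x:
--                     if cnt + 1 >= len(dist):
--                         break
--
--                     # 새로운 인원 추가가
--                     cnt += 1
--                     now = weak[i] + order[cnt]
--             else:
--                 if ans == -1 or cnt + 1 < ans:
--                     ans = cnt + 1
--     return ans
-- ===== SOURCE B (Python) =====
-- from itertools import permutations
--
-- def solution(n, weak, dist):
--     m = len(weak)
--     # reproduce A's in-place extension of weak (observable side effect)
--     weak += [x + n for x in weak]
--
--     # search by increasing number of friends: the first k that works is the answer
--     for k in range(1, len(dist) + 1):
--         for s in range(m):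
--             for order in permutations(dist, k):
--                 cnt = 0
--                 now = weak[s] + order[cnt]
--                 ok = True
--                 for x in weak[s:s + m]:
--                     if now < x:
--                         if cnt + 1 >= k:
--                             ok = False
--                             break
--                         cnt += 1
--                         now = x + order[cnt]
--                 if ok:
--                     return k
--     return -1
-- ===== Notes on version B (the rewrite author's own statement) =====
-- stated objective: alternative
-- what changed: Instead of taking the minimum used-count over all m starts and all |dist|! full permutations, B searches friend counts k = 1..|dist| in increasing order and returns the first k for which some start and some k-permutation of dist covers all weak points, so the factorial enumeration stops at the optimal k.
import Mathlib
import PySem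

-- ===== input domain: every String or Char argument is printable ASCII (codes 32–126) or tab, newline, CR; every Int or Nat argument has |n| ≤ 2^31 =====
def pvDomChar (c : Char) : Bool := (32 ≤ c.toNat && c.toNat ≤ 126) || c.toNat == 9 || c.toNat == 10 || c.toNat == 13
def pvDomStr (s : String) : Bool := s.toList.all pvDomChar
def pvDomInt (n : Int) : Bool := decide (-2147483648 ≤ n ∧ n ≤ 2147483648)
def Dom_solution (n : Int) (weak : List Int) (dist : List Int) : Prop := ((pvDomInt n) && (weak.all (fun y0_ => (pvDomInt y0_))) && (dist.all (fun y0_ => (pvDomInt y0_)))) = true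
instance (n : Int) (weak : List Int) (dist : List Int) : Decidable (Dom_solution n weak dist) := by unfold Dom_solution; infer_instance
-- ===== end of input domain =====

-- B searches friend counts k = 1,2,… and returns the first k for which some start and some
-- k-permutation of dist covers all weak points, instead of A's minimum over all full
-- permutations.  Both A and B mutate `weak` in place (weak += [x+n …]); the equivalence
-- proved here is about the return value.

-- ===== PORT A =====
-- A's inner for-loop over weak[s:s+m] (note weak[i] = x there): some cnt if the loop
-- completes (Python's for-else), none if it breaks
def simALoop (L : Nat) (order : List Int) : List Int → Nat → Int → Option Nat
  | [], cnt, _ => some cnt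
  | x :: rest, cnt, now =>
    if now < x then
      if L ≤ cnt + 1 then none
      else simALoop L order rest (cnt + 1) (x + order.getD (cnt + 1) 0)
    else simALoop L order rest cnt now

def solution (n : Int) (weak : List Int) (dist : List Int) : Int :=
  let m := weak.length
  let weak2 := weak ++ weak.map (fun x => x + n)
  (List.range m).foldl (fun (ans : Int) (s : Nat) =>
      (PySem.List.permutations dist dist.length).foldl (fun ans order =>
          match simALoop dist.length order
              (PySem.List.slice weak2 (some (s : Int)) (some ((s : Int) + (m : Int))))
              0 (weak2.getD s 0 + order.getD 0 0) with
          | some cnt => if ans = -1 ∨ (cnt : Int) + 1 < ans then (cnt : Int) + 1 else ans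
          | none => ans)
        ans)
    (-1)

-- ===== PORT B =====
-- B's inner loop: does this k-tuple of friends, started at s, cover weak[s:s+m]?
def coversLoop (k : Nat) (order : List Int) : List Int → Nat → Int → Bool
  | [], _, _ => true
  | x :: rest, cnt, now =>
    if now < x then
      if k ≤ cnt + 1 then false
      else coversLoop k order rest (cnt + 1) (x + order.getD (cnt + 1) 0)
    else coversLoop k order rest cnt now

-- B's outer loop `for k in range(1, len(dist)+1): … return k` with early return
def searchB (m : Nat) (weak2 : List Int) (dist : List Int) : List Nat → Int
  | [] => -1
  | k :: ks =>
    if (List.range m).any (fun (s : Nat) =>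
        (PySem.List.permutations dist k).any (fun order =>
          coversLoop k order
            (PySem.List.slice weak2 (some (s : Int)) (some ((s : Int) + (m : Int))))
            0 (weak2.getD s 0 + order.getD 0 0)))
    then (k : Int) else searchB m weak2 dist ks

def solution_alt (n : Int) (weak : List Int) (dist : List Int) : Int :=
  let m := weak.length
  let weak2 := weak ++ weak.map (fun x => x + n)
  searchB m weak2 dist (List.range' 1 dist.length)

-- ===== PRECONDITION & SPEC =====
-- Pre_ excludes only dist = [] with weak ≠ [], where A raises IndexError on order[cnt].
def Pre_solution (n : Int) (weak : List Int) (dist : List Int) : Prop := dist ≠ [] ∨ weak = []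
instance (n : Int) (weak : List Int) (dist : List Int) : Decidable (Pre_solution n weak dist) := by
  unfold Pre_solution; infer_instance

def pvWitness_solution : Int × List Int × List Int := (12, [1, 5, 6, 10], [1, 2, 3])

def Spec_solution (n : Int) (weak : List Int) (dist : List Int) (out : Int) : Prop := out = solution_alt n weak dist
instance (n : Int) (weak : List Int) (dist : List Int) (out : Int) : Decidable (Spec_solution n weak dist out) := by unfold Spec_solution; infer_instance

-- ===== CLAIM (what is proved, stated in full; the proofs are below) =====
def Claim_equal_solution : Prop := ∀ (n : Int) (weak : List Int) (dist : List Int), Dom_solution n weak dist → Pre_solution n weak dist → Spec_solution n weak dist (solution n weak dist)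

-- ===== LEMMAS AND PROOFS =====

-- proof-only abbreviations
def sl (w2 : List Int) (s m : Nat) : List Int :=
  PySem.List.slice w2 (some (s : Int)) (some ((s : Int) + (m : Int)))

def now0 (w2 : List Int) (s : Nat) (o : List Int) : Int := w2.getD s 0 + o.getD 0 0

-- "k friends can cover, starting somewhere": the proposition both searches decide
def covN (w2 : List Int) (m : Nat) (dist : List Int) (k : Nat) : Prop :=
  ∃ s < m, ∃ perm : List Int, perm.length = k ∧ perm.Subperm dist ∧
    (simALoop k perm (sl w2 s m) 0 (now0 w2 s perm)).isSome = true

def minStep (a v : Int) : Int := if a = -1 ∨ v < a then v else a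

-- the multiset of used-counts A minimises over
def useVals (w2 : List Int) (m K : Nat) (dist : List Int) : List Int :=
  (List.range m).flatMap (fun s =>
    (PySem.List.permutations dist K).filterMap (fun order =>
      (simALoop K order (sl w2 s m) 0 (now0 w2 s order)).map (fun c => (c : Int) + 1)))

theorem solution_eq_minFold (n : Int) (weak dist : List Int) :
    solution n weak dist =
      (useVals (weak ++ weak.map (fun x => x + n)) weak.length dist.length dist).foldl
        minStep (-1) := by
  simp only [solution, useVals, sl, now0, List.foldl_flatMap, List.foldl_filterMap]
  apply PySem.List.foldl_congr_mem
  intro acc s _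
  apply PySem.List.foldl_congr_mem
  intro acc2 order _
  cases simALoop dist.length order
      (PySem.List.slice (weak ++ weak.map (fun x => x + n)) (some (s : Int))
        (some ((s : Int) + (weak.length : Int))))
      0 ((weak ++ weak.map (fun x => x + n)).getD s 0 + order.getD 0 0) with
  | none => rfl
  | some c => simp [minStep]


theorem useVals_pos {w2 : List Int} {m K : Nat} {dist : List Int} {v : Int}
    (h : v ∈ useVals w2 m K dist) : 1 ≤ v := by
  simp only [useVals, List.mem_flatMap, List.mem_filterMap] at h
  obtain ⟨s, -, order, -, hmap⟩ := h
  cases hcs : simALoop K order (sl w2 s m) 0 (now0 w2 s order) with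
  | none => rw [hcs] at hmap; simp at hmap
  | some c =>
    rw [hcs] at hmap
    have hv : (c : Int) + 1 = v := by simpa using hmap
    omega


theorem minFold_pos (V : List Int) : ∀ a : Int, 1 ≤ a → (∀ v ∈ V, 1 ≤ v) →
    (V.foldl minStep a = a ∨ V.foldl minStep a ∈ V) ∧ V.foldl minStep a ≤ a ∧
      ∀ v ∈ V, V.foldl minStep a ≤ v := by
  induction V with
  | nil => intro a _ _; exact ⟨Or.inl rfl, le_refl a, by simp⟩
  | cons x V ih =>
    intro a ha hp
    have hx : (1 : Int) ≤ x := hp x List.mem_cons_self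
    have hstep : minStep a x = if x < a then x else a := by
      simp only [minStep]
      have hne : ¬ a = -1 := by omega
      by_cases hxa : x < a <;> simp [hxa, hne]
    have hs1 : 1 ≤ minStep a x := by rw [hstep]; split_ifs <;> omega
    have hsa : minStep a x ≤ a := by rw [hstep]; split_ifs <;> omega
    have hsx : minStep a x ≤ x := by rw [hstep]; split_ifs <;> omega
    obtain ⟨hmem, hle, hall⟩ :=
      ih (minStep a x) hs1 (fun v hv => hp v (List.mem_cons_of_mem _ hv))
    rw [List.foldl_cons]
    refine ⟨?_, le_trans hle hsa, ?_⟩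
    · rcases hmem with h | h
      · rw [h, hstep]; split_ifs
        · exact Or.inr List.mem_cons_self
        · exact Or.inl rfl
      · exact Or.inr (List.mem_cons_of_mem _ h)
    · intro v hv
      rcases List.mem_cons.mp hv with rfl | hv
      · exact le_trans hle hsx
      · exact hall v hv


theorem minFold_spec (V : List Int) (hpos : ∀ v ∈ V, 1 ≤ v) :
    (V = [] ∧ V.foldl minStep (-1) = -1) ∨
      (V.foldl minStep (-1) ∈ V ∧ ∀ v ∈ V, V.foldl minStep (-1) ≤ v) := by
  cases V with
  | nil => exact Or.inl ⟨rfl, rfl⟩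
  | cons x V =>
    right
    have hx : (1 : Int) ≤ x := hpos x List.mem_cons_self
    have h0 : minStep (-1) x = x := by simp [minStep]
    rw [List.foldl_cons, h0]
    obtain ⟨hmem, hle, hall⟩ :=
      minFold_pos V x hx (fun v hv => hpos v (List.mem_cons_of_mem _ hv))
    refine ⟨?_, ?_⟩
    · rcases hmem with h | h
      · rw [h]; exact List.mem_cons_self
      · exact List.mem_cons_of_mem _ h
    · intro v hv
      rcases List.mem_cons.mp hv with rfl | hv
      · exact hle
      · exact hall v hv


theorem coversLoop_eq_isSome (k : Nat) (o : List Int) :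
    ∀ (xs : List Int) (cnt : Nat) (now : Int),
      coversLoop k o xs cnt now = (simALoop k o xs cnt now).isSome := by
  intro xs
  induction xs with
  | nil => intro cnt now; rfl
  | cons x rest ih =>
    intro cnt now
    simp only [coversLoop, simALoop]
    split_ifs <;> simp [ih]


theorem simALoop_le (k : Nat) (o : List Int) :
    ∀ (xs : List Int) (cnt : Nat) (now : Int) (c : Nat),
      simALoop k o xs cnt now = some c → cnt ≤ c := by
  intro xs
  induction xs with
  | nil => intro cnt now c h; simp only [simALoop, Option.some.injEq] at h; omega
  | cons x rest ih =>
    intro cnt now c h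
    simp only [simALoop] at h
    split_ifs at h
    · exact Nat.le_of_succ_le (ih _ _ _ h)
    · exact ih _ _ _ h


theorem simALoop_lt (k : Nat) (o : List Int) :
    ∀ (xs : List Int) (cnt : Nat) (now : Int) (c : Nat),
      cnt < k → simALoop k o xs cnt now = some c → c < k := by
  intro xs
  induction xs with
  | nil => intro cnt now c hk h; simp only [simALoop, Option.some.injEq] at h; omega
  | cons x rest ih =>
    intro cnt now c hk h
    simp only [simALoop] at h
    split_ifs at h with h1 h2
    · exact ih _ _ _ (by omega) h
    · exact ih _ _ _ hk h


theorem simALoop_congr {k1 k2 : Nat} {o1 o2 : List Int} :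
    ∀ (xs : List Int) (cnt : Nat) (now : Int) (c : Nat),
      simALoop k1 o1 xs cnt now = some c → c + 1 ≤ k2 →
      (∀ j, j ≤ c → o2.getD j 0 = o1.getD j 0) →
      simALoop k2 o2 xs cnt now = some c := by
  intro xs
  induction xs with
  | nil => intro cnt now c h _ _; exact h
  | cons x rest ih =>
    intro cnt now c h hk2 hag
    by_cases hx : now < x
    · rw [simALoop, if_pos hx] at h
      have h2 : ¬ k1 ≤ cnt + 1 := by
        intro hh; rw [if_pos hh] at h; exact (by simp at h)
      rw [if_neg h2] at h
      have hle := simALoop_le k1 o1 rest (cnt + 1) _ c h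
      rw [simALoop, if_pos hx, if_neg (show ¬ k2 ≤ cnt + 1 by omega),
        hag (cnt + 1) (by omega)]
      exact ih _ _ _ h hk2 hag
    · rw [simALoop, if_neg hx] at h
      rw [simALoop, if_neg hx]
      exact ih _ _ _ h hk2 hag


theorem mem_permutations_iff : ∀ (k : Nat) (xs l : List Int),
    l ∈ PySem.List.permutations xs k ↔ l.length = k ∧ l.Subperm xs := by
  intro k
  induction k with
  | zero =>
    intro xs l
    simp only [PySem.List.permutations, List.mem_singleton]
    constructor
    · rintro rfl; exact ⟨rfl, List.nil_subperm⟩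
    · rintro ⟨hl, -⟩; exact List.eq_nil_of_length_eq_zero hl
  | succ k ih =>
    intro xs l
    simp only [PySem.List.permutations, List.mem_flatMap, List.mem_range]
    constructor
    · rintro ⟨i, hi, hmem⟩
      rw [List.getElem?_eq_getElem hi] at hmem
      simp only [List.mem_map] at hmem
      obtain ⟨t, ht, rfl⟩ := hmem
      obtain ⟨htl, hts⟩ := (ih _ _).mp ht
      refine ⟨by simp [htl], ?_⟩
      exact ((List.subperm_cons _).mpr hts).trans (List.getElem_cons_eraseIdx_perm hi).subperm
    · rintro ⟨hl, hs⟩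
      obtain ⟨a, t, rfl⟩ : ∃ a t, l = a :: t := by
        cases l with
        | nil => simp at hl
        | cons a t => exact ⟨a, t, rfl⟩
      have ha : a ∈ xs := hs.subset (List.mem_cons_self)
      have hi : xs.idxOf a < xs.length := List.idxOf_lt_length_of_mem ha
      have hxi : xs[xs.idxOf a] = a := List.getElem_idxOf hi
      have hperm : xs.Perm (a :: xs.eraseIdx (xs.idxOf a)) := by
        have := (List.getElem_cons_eraseIdx_perm hi).symm
        rwa [hxi] at this
      have hts : t.Subperm (xs.eraseIdx (xs.idxOf a)) := by
        have := hs.trans hperm.subperm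
        exact (List.subperm_cons _).mp this
      refine ⟨xs.idxOf a, hi, ?_⟩
      rw [List.getElem?_eq_getElem hi]
      simp only [List.mem_map]
      exact ⟨t, (ih _ _).mpr ⟨by simpa using hl, hts⟩, by rw [hxi]⟩


theorem subperm_exists_append {l xs : List Int} (h : l.Subperm xs) :
    ∃ r, (l ++ r).Perm xs := by
  obtain ⟨u, hu, hsub⟩ := h
  obtain ⟨r, hr⟩ := hsub.exists_perm_append
  exact ⟨r, ((hu.append_right r).symm.trans hr.symm)⟩


theorem getD_take (o : List Int) (c j : Nat) (hj : j ≤ c) :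
    (o.take (c + 1)).getD j 0 = o.getD j 0 := by
  simp [List.getD_eq_getElem?_getD, Nat.lt_succ_of_le hj]


theorem getD_append_left (o r : List Int) (j : Nat) (hj : j < o.length) :
    (o ++ r).getD j 0 = o.getD j 0 := by
  simp [List.getD_eq_getElem?_getD, List.getElem?_append_left hj]


theorem searchB_cond (w2 : List Int) (m k : Nat) (dist : List Int) :
    ((List.range m).any (fun (s : Nat) =>
        (PySem.List.permutations dist k).any (fun order =>
          coversLoop k order
            (PySem.List.slice w2 (some (s : Int)) (some ((s : Int) + (m : Int))))
            0 (w2.getD s 0 + order.getD 0 0))) = true) ↔ covN w2 m dist k := by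
  simp only [List.any_eq_true, List.mem_range, coversLoop_eq_isSome, covN, sl, now0]
  constructor
  · rintro ⟨s, hs, order, ho, hcov⟩
    obtain ⟨hlen, hsub⟩ := (mem_permutations_iff _ _ _).mp ho
    exact ⟨s, hs, order, hlen, hsub, hcov⟩
  · rintro ⟨s, hs, perm, hlen, hsub, hcov⟩
    exact ⟨s, hs, perm, (mem_permutations_iff _ _ _).mpr ⟨hlen, hsub⟩, hcov⟩


theorem searchB_neg (m : Nat) (w2 dist : List Int) :
    ∀ ks : List Nat, (∀ k ∈ ks, ¬ covN w2 m dist k) → searchB m w2 dist ks = -1 := by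
  intro ks
  induction ks with
  | nil => intro _; rfl
  | cons k ks ih =>
    intro h
    have hc : ¬ _ := fun hc => h k List.mem_cons_self ((searchB_cond w2 m k dist).mp hc)
    simp only [searchB]
    rw [if_neg hc]
    exact ih fun k' hk' => h k' (List.mem_cons_of_mem _ hk')


theorem searchB_pos (m : Nat) (w2 dist : List Int) (a : Nat) :
    ∀ (len start : Nat), start ≤ a → a < start + len → covN w2 m dist a →
      (∀ k, start ≤ k → k < a → ¬ covN w2 m dist k) →
      searchB m w2 dist (List.range' start len) = (a : Int) := by
  intro len
  induction len with
  | zero => intro start h1 h2 _ _; omega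
  | succ len ih =>
    intro start h1 h2 hcov hlt
    rw [List.range'_succ]
    by_cases he : start = a
    · subst he
      simp only [searchB]
      rw [if_pos ((searchB_cond w2 m start dist).mpr hcov)]
    · have hsa : start < a := lt_of_le_of_ne h1 he
      simp only [searchB]
      rw [if_neg (fun hc => hlt start le_rfl hsa ((searchB_cond w2 m start dist).mp hc))]
      exact ih (start + 1) (by omega) (by omega) hcov
        (fun k hk hka => hlt k (by omega) hka)


theorem bridgeA {w2 : List Int} {m : Nat} {dist : List Int} {v : Int}
    (hd : dist ≠ []) (h : v ∈ useVals w2 m dist.length dist) :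
    1 ≤ v ∧ v ≤ (dist.length : Int) ∧ covN w2 m dist v.toNat := by
  simp only [useVals, List.mem_flatMap, List.mem_filterMap, List.mem_range] at h
  obtain ⟨s, hs, order, ho, hmap⟩ := h
  obtain ⟨olen, osub⟩ := (mem_permutations_iff _ _ _).mp ho
  have hK : 0 < dist.length := List.length_pos_iff.mpr hd
  obtain ⟨c, hc, hv⟩ : ∃ c, simALoop dist.length order (sl w2 s m) 0 (now0 w2 s order)
      = some c ∧ (c : Int) + 1 = v := by
    cases hcs : simALoop dist.length order (sl w2 s m) 0 (now0 w2 s order) with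
    | none => rw [hcs] at hmap; simp at hmap
    | some c => rw [hcs] at hmap; exact ⟨c, rfl, by simpa using hmap⟩
  have hck : c < dist.length := simALoop_lt _ _ _ _ _ _ hK hc
  refine ⟨by omega, by omega, s, hs, order.take (c + 1), ?_, ?_, ?_⟩
  · rw [List.length_take]; omega
  · exact ((List.take_sublist _ _).subperm).trans osub
  · have hag : ∀ j, j ≤ c → (order.take (c + 1)).getD j 0 = order.getD j 0 :=
      fun j hj => getD_take order c j hj
    have hnow : now0 w2 s (order.take (c + 1)) = now0 w2 s order := by
      simp only [now0]; rw [hag 0 (Nat.zero_le c)]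
    have hvt : v.toNat = c + 1 := by omega
    have hsim := simALoop_congr (sl w2 s m) 0 (now0 w2 s order) c hc
      (le_refl (c + 1)) hag
    rw [hvt, hnow, hsim]
    rfl


theorem bridgeB {w2 : List Int} {m k : Nat} {dist : List Int}
    (h : covN w2 m dist k) (hk : 1 ≤ k) :
    ∃ v ∈ useVals w2 m dist.length dist, v ≤ (k : Int) := by
  obtain ⟨s, hs, perm, hlen, hsub, hsome⟩ := h
  obtain ⟨c, hc⟩ := Option.isSome_iff_exists.mp hsome
  have hck : c < k := simALoop_lt _ _ _ _ _ _ (by omega) hc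
  obtain ⟨r, hperm⟩ := subperm_exists_append hsub
  have horder : (perm ++ r) ∈ PySem.List.permutations dist dist.length :=
    (mem_permutations_iff _ _ _).mpr ⟨hperm.length_eq, hperm.subperm⟩
  have hkK : k ≤ dist.length := hlen ▸ hsub.length_le
  have hag : ∀ j, j ≤ c → (perm ++ r).getD j 0 = perm.getD j 0 :=
    fun j hj => getD_append_left perm r j (by omega)
  have hsim := simALoop_congr (sl w2 s m) 0 (now0 w2 s perm) c hc
    (by omega : c + 1 ≤ dist.length) hag
  have hnow : now0 w2 s (perm ++ r) = now0 w2 s perm := by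
    simp only [now0]; rw [getD_append_left perm r 0 (by omega)]
  refine ⟨(c : Int) + 1, ?_, by omega⟩
  simp only [useVals, List.mem_flatMap, List.mem_filterMap, List.mem_range]
  exact ⟨s, hs, perm ++ r, horder, by rw [hnow, hsim]; rfl⟩


-- ===== VERDICT (by name: the statement is the Claim_ definition above) =====
theorem solution_spec : Claim_equal_solution := by
  intro n weak dist hdom hpre
  unfold Spec_solution
  rw [solution_eq_minFold]
  have hB : solution_alt n weak dist =
      searchB weak.length (weak ++ weak.map (fun x => x + n)) dist
        (List.range' 1 dist.length) := rfl
  rw [hB]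
  rcases minFold_spec
      (useVals (weak ++ weak.map (fun x => x + n)) weak.length dist.length dist)
      (fun v hv => useVals_pos hv) with ⟨hV, hA⟩ | ⟨hmem, hmin⟩
  · rw [hA]
    symm
    apply searchB_neg
    intro k hk hcov
    obtain ⟨v, hv, -⟩ := bridgeB hcov (List.mem_range'_1.mp hk).1
    rw [hV] at hv
    simp at hv
  · have hwk : weak ≠ [] := by
      intro hnil
      rw [hnil] at hmem
      simp [useVals] at hmem
    have hd : dist ≠ [] := hpre.resolve_right hwk
    obtain ⟨h1, h2, hcov⟩ := bridgeA hd hmem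
    have hs := searchB_pos weak.length (weak ++ weak.map (fun x => x + n)) dist
      ((useVals (weak ++ weak.map (fun x => x + n)) weak.length dist.length dist).foldl
        minStep (-1)).toNat dist.length 1 (by omega) (by omega) hcov ?_
    · rw [hs]; omega
    · intro k hk1 hka hcov2
      obtain ⟨v, hv, hvk⟩ := bridgeB hcov2 hk1
      have := hmin v hv
      omega
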